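-- pv_equiv track=rewrite | github.com/Fodonzo/chalmers-advanced-python | labs/lab2/tramdata.py | lines_between_stops
-- ===== SOURCE A (Python) =====
-- def lines_between_stops(linedict, stop1, stop2):
--     stop1 = stop1.lower()
--     stop2 = stop2.lower()
--
--     lines_that_pass_both_stops = []
--
--     for line_number, stops in linedict.items():
--         stops_lower = [s.lower() for s in stops]
--
--         if stop1 in stops_lower and stop2 in stops_lower:
--             index1 = stops_lower.index(stop1)
--             index2 = stops_lower.index(stop2)
--
--             if index1 is not None and index2 is not None:
--                 lines_that_pass_both_stops.append(line_number)
--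
--     lines_that_pass_both_stops.sort()
--
--     return lines_that_pass_both_stops
-- ===== SOURCE B (Python) =====
-- def lines_between_stops(linedict, stop1, stop2):
--     index = {}
--     for line_number, stops in linedict.items():
--         for s in stops:
--             index.setdefault(s.lower(), set()).add(line_number)
--     return sorted(index.get(stop1.lower(), set()) & index.get(stop2.lower(), set()))
-- ===== Notes on version B (the rewrite author's own statement) =====
-- stated objective: alternative
-- what changed: Replaces the per-line double membership scan (plus redundant .index calls) with a one-pass inverted index from lowercased stop name to the set of lines serving it, answering the query as the sorted intersection of two indexed sets.
import Mathlib
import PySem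

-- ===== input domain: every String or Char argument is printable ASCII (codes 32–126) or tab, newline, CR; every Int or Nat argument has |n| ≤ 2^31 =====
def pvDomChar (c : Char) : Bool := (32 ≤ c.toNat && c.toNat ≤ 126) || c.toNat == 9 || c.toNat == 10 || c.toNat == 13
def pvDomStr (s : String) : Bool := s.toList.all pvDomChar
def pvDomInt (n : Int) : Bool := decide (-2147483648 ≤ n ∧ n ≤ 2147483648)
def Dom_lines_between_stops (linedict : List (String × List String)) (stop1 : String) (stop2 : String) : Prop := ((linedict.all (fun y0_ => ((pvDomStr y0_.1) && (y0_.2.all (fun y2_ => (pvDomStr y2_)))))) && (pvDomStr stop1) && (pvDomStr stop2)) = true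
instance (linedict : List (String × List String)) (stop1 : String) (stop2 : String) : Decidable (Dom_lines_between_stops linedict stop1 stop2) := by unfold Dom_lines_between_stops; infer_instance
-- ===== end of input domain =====

-- B replaces A's per-line double membership scan with an inverted index (lowercased stop → set of lines) and a sorted set intersection; alternative decomposition, not claimed faster.

-- ===== PORT A =====
def lines_between_stops (linedict : List (String × List String)) (stop1 : String) (stop2 : String) : List String :=
  let s1 := PySem.Str.lower stop1
  let s2 := PySem.Str.lower stop2
  let acc := linedict.foldl (fun acc p =>
    let stops_lower := p.2.map PySem.Str.lower
    if s1 ∈ stops_lower ∧ s2 ∈ stops_lower then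
      let index1 := PySem.List.index? stops_lower s1
      let index2 := PySem.List.index? stops_lower s2
      if index1.isSome ∧ index2.isSome then acc ++ [p.1] else acc
    else acc) []
  PySem.List.sorted acc (fun x => x) false

-- ===== PORT B =====
-- index.setdefault(s.lower(), set()).add(line) is Dict.modify with default ∅ and Set.add
def pvBuildIndex (linedict : List (String × List String)) : PySem.Dict String (PySem.Set String) :=
  linedict.foldl (fun d p =>
    p.2.foldl (fun d s =>
      PySem.Dict.modify d (PySem.Str.lower s) PySem.Set.empty (fun t => PySem.Set.add t p.1)) d)
    PySem.Dict.empty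

def lines_between_stops_alt (linedict : List (String × List String)) (stop1 : String) (stop2 : String) : List String :=
  let index := pvBuildIndex linedict
  PySem.List.sorted
    (PySem.Set.inter
      (PySem.Dict.getD index (PySem.Str.lower stop1) PySem.Set.empty)
      (PySem.Dict.getD index (PySem.Str.lower stop2) PySem.Set.empty))
    (fun x => x) false

-- ===== PRECONDITION & SPEC =====
-- Pre_ excludes only association lists with a duplicated key: those represent no Python dict
-- (A's parameter is a dict, whose keys are unique), so no input A accepts is excluded.
def Pre_lines_between_stops (linedict : List (String × List String)) (stop1 : String) (stop2 : String) : Prop :=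
  (linedict.map Prod.fst).Nodup
instance (linedict : List (String × List String)) (stop1 : String) (stop2 : String) : Decidable (Pre_lines_between_stops linedict stop1 stop2) := by unfold Pre_lines_between_stops; infer_instance
def pvWitness_lines_between_stops : (List (String × List String)) × String × String :=
  ([("4", ["x", "Ab", "c"]), ("1", ["ab", "y"]), ("3", ["c", "AB"])], "AB", "c")

def Spec_lines_between_stops (linedict : List (String × List String)) (stop1 : String) (stop2 : String) (out : List String) : Prop := out = lines_between_stops_alt linedict stop1 stop2
instance (linedict : List (String × List String)) (stop1 : String) (stop2 : String) (out : List String) : Decidable (Spec_lines_between_stops linedict stop1 stop2 out) := by unfold Spec_lines_between_stops; infer_instance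

-- ===== CLAIM (what is proved, stated in full; the proofs are below) =====
def Claim_equal_lines_between_stops : Prop := ∀ (linedict : List (String × List String)) (stop1 : String) (stop2 : String), Dom_lines_between_stops linedict stop1 stop2 → Pre_lines_between_stops linedict stop1 stop2 → Spec_lines_between_stops linedict stop1 stop2 (lines_between_stops linedict stop1 stop2)

-- ===== LEMMAS AND PROOFS =====

-- inner loop of the index build: adds `line` to the bucket of each lowercased stop
lemma pv_mem_inner (stops : List String) (line : String)
    (d : PySem.Dict String (PySem.Set String)) (k y : String) :
    y ∈ (stops.foldl (fun d s =>
        PySem.Dict.modify d (PySem.Str.lower s) PySem.Set.empty (fun t => PySem.Set.add t line)) d).getD k PySem.Set.empty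
      ↔ y ∈ d.getD k PySem.Set.empty ∨ (y = line ∧ k ∈ stops.map PySem.Str.lower) := by
  induction stops generalizing d with
  | nil => simp
  | cons s rest ih =>
    simp only [List.foldl_cons, ih, PySem.Dict.getD_modify, List.map_cons, List.mem_cons]
    by_cases hk : k = PySem.Str.lower s
    · subst hk; simp [PySem.Set.mem_add]; tauto
    · simp only [if_neg hk]
      constructor
      · rintro (h | h); · tauto
        · exact Or.inr ⟨h.1, Or.inr h.2⟩
      · rintro (h | ⟨hy, h | h⟩)
        · tauto
        · exact absurd h hk
        · exact Or.inr ⟨hy, h⟩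

lemma pv_mem_index (linedict : List (String × List String)) (k y : String) :
    y ∈ (pvBuildIndex linedict).getD k PySem.Set.empty
      ↔ ∃ p ∈ linedict, p.1 = y ∧ k ∈ p.2.map PySem.Str.lower := by
  have gen : ∀ (l : List (String × List String)) (d : PySem.Dict String (PySem.Set String)),
      y ∈ (l.foldl (fun d p =>
          p.2.foldl (fun d s =>
            PySem.Dict.modify d (PySem.Str.lower s) PySem.Set.empty (fun t => PySem.Set.add t p.1)) d) d).getD k PySem.Set.empty
        ↔ y ∈ d.getD k PySem.Set.empty ∨ ∃ p ∈ l, p.1 = y ∧ k ∈ p.2.map PySem.Str.lower := by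
    intro l
    induction l with
    | nil => simp
    | cons p rest ih =>
      intro d
      simp only [List.foldl_cons, ih, pv_mem_inner, List.mem_cons]
      constructor
      · rintro (((h | h) | h))
        · exact Or.inl h
        · exact Or.inr ⟨p, Or.inl rfl, h.1.symm, h.2⟩
        · obtain ⟨q, hq, hh⟩ := h; exact Or.inr ⟨q, Or.inr hq, hh⟩
      · rintro (h | ⟨q, hq | hq, hh⟩)
        · exact Or.inl (Or.inl h)
        · subst hq; exact Or.inl (Or.inr ⟨hh.1.symm, hh.2⟩)
        · exact Or.inr ⟨q, hq, hh⟩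
  simpa [pvBuildIndex, PySem.Dict.getD_empty] using gen linedict PySem.Dict.empty

lemma pv_nodup_index (linedict : List (String × List String)) (k : String) :
    ((pvBuildIndex linedict).getD k PySem.Set.empty).Nodup := by
  have inner : ∀ (stops : List String) (line : String)
      (d : PySem.Dict String (PySem.Set String)),
      (∀ k', (d.getD k' PySem.Set.empty).Nodup) →
      ∀ k', ((stops.foldl (fun d s =>
          PySem.Dict.modify d (PySem.Str.lower s) PySem.Set.empty (fun t => PySem.Set.add t line)) d).getD k' PySem.Set.empty).Nodup := by
    intro stops line
    induction stops with
    | nil => intro d h k'; simpa using h k'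
    | cons s rest ih =>
      intro d h k'
      refine ih _ (fun k'' => ?_) k'
      rw [PySem.Dict.getD_modify]
      split_ifs with hk
      · exact PySem.Set.nodup_add _ _ (h _)
      · exact h _
  have gen : ∀ (l : List (String × List String)) (d : PySem.Dict String (PySem.Set String)),
      (∀ k', (d.getD k' PySem.Set.empty).Nodup) →
      ∀ k', ((l.foldl (fun d p =>
          p.2.foldl (fun d s =>
            PySem.Dict.modify d (PySem.Str.lower s) PySem.Set.empty (fun t => PySem.Set.add t p.1)) d) d).getD k' PySem.Set.empty).Nodup := by
    intro l
    induction l with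
    | nil => exact fun d h k' => h k'
    | cons p rest ih => exact fun d h k' => ih _ (inner p.2 p.1 d h) k'
  exact gen linedict PySem.Dict.empty (fun k' => by simp [PySem.Dict.getD_empty, PySem.Set.empty]) k

-- A's loop is append-if: it collects the keys of the entries containing both stops
lemma pv_accA (linedict : List (String × List String)) (s1 s2 : String) :
    linedict.foldl (fun acc p =>
      let stops_lower := p.2.map PySem.Str.lower
      if s1 ∈ stops_lower ∧ s2 ∈ stops_lower then
        let index1 := PySem.List.index? stops_lower s1
        let index2 := PySem.List.index? stops_lower s2
        if index1.isSome ∧ index2.isSome then acc ++ [p.1] else acc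
      else acc) []
    = (linedict.filter (fun p => decide (s1 ∈ p.2.map PySem.Str.lower ∧ s2 ∈ p.2.map PySem.Str.lower))).map Prod.fst := by
  have gen : ∀ (l : List (String × List String)) (acc : List String),
      l.foldl (fun acc p =>
        let stops_lower := p.2.map PySem.Str.lower
        if s1 ∈ stops_lower ∧ s2 ∈ stops_lower then
          let index1 := PySem.List.index? stops_lower s1
          let index2 := PySem.List.index? stops_lower s2
          if index1.isSome ∧ index2.isSome then acc ++ [p.1] else acc
        else acc) acc
      = acc ++ (l.filter (fun p => decide (s1 ∈ p.2.map PySem.Str.lower ∧ s2 ∈ p.2.map PySem.Str.lower))).map Prod.fst := by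
    intro l
    induction l with
    | nil => simp
    | cons p rest ih =>
      intro acc
      simp only [List.foldl_cons]
      by_cases h : s1 ∈ p.2.map PySem.Str.lower ∧ s2 ∈ p.2.map PySem.Str.lower
      · rw [if_pos h, if_pos, ih]
        · rw [List.filter_cons, if_pos (by simpa using h)]
          simp
        · simp only [PySem.List.index?_isSome_iff]; exact ⟨h.1, h.2⟩
      · rw [if_neg h, ih, List.filter_cons, if_neg (by simpa using h)]
  simpa using gen linedict []

-- ===== VERDICT (by name: the statement is the Claim_ definition above) =====
theorem lines_between_stops_spec : Claim_equal_lines_between_stops := by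
  intro linedict stop1 stop2 _hdom hpre
  unfold Spec_lines_between_stops lines_between_stops lines_between_stops_alt
  simp only [pv_accA]
  set s1 := PySem.Str.lower stop1
  set s2 := PySem.Str.lower stop2
  apply PySem.List.sorted_eq_sorted_of_perm _ _ _ (fun a b h => h)
  have hinj : ∀ p ∈ linedict, ∀ q ∈ linedict, p.1 = q.1 → p = q :=
    List.inj_on_of_nodup_map hpre
  have hnodupA : ((linedict.filter (fun p => decide (s1 ∈ p.2.map PySem.Str.lower ∧ s2 ∈ p.2.map PySem.Str.lower))).map Prod.fst).Nodup :=
    hpre.sublist (List.Sublist.map Prod.fst List.filter_sublist)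
  have hnodupB : (PySem.Set.inter
      (PySem.Dict.getD (pvBuildIndex linedict) s1 PySem.Set.empty)
      (PySem.Dict.getD (pvBuildIndex linedict) s2 PySem.Set.empty)).Nodup :=
    PySem.Set.nodup_inter _ _ (pv_nodup_index linedict s1)
  rw [List.perm_ext_iff_of_nodup hnodupA hnodupB]
  intro y
  simp only [List.mem_map, List.mem_filter, PySem.Set.mem_inter, pv_mem_index, decide_eq_true_eq]
  constructor
  · rintro ⟨p, ⟨hp, h1, h2⟩, rfl⟩
    exact ⟨⟨p, hp, rfl, h1⟩, ⟨p, hp, rfl, h2⟩⟩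
  · rintro ⟨⟨p, hp, hpy, h1⟩, ⟨q, hq, hqy, h2⟩⟩
    have : p = q := hinj p hp q hq (hpy.trans hqy.symm)
    subst this
    exact ⟨p, ⟨hp, h1, h2⟩, hpy⟩
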